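-- pv_equiv track=rewrite | github.com/ArtemKhadris/binary_class_test_task | process_vid_by_yolo.py | count_zero_ranges
-- ===== SOURCE A (Python) =====
-- def count_zero_ranges(lst):
--     zero_ranges = []
--     start = None
--     for i, value in enumerate(lst):
--         if value == 0:
--             if start is None:
--                 start = i
--         elif start is not None:
--             zero_ranges.append([start, i - 1])
--             start = None
--     if start is not None:
--         zero_ranges.append([start, len(lst) - 1])
--     return zero_ranges
-- ===== SOURCE B (Python) =====
-- def count_zero_ranges(lst):
--     res = []
--     i, n = 0, len(lst)
--     while i < n:
--         is_zero = (lst[i] == 0)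
--         j = i + 1
--         while j < n and (lst[j] == 0) == is_zero:
--             j += 1
--         if is_zero:
--             res.append([i, j - 1])
--         i = j
--     return res
-- ===== Notes on version B (the rewrite author's own statement) =====
-- stated objective: alternative
-- what changed: Replaces the start/None state-machine over enumerate with a two-pointer run scanner: each maximal run of equal zero-ness is consumed at once and zero runs emit [i, j-1] directly.
import Mathlib
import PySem

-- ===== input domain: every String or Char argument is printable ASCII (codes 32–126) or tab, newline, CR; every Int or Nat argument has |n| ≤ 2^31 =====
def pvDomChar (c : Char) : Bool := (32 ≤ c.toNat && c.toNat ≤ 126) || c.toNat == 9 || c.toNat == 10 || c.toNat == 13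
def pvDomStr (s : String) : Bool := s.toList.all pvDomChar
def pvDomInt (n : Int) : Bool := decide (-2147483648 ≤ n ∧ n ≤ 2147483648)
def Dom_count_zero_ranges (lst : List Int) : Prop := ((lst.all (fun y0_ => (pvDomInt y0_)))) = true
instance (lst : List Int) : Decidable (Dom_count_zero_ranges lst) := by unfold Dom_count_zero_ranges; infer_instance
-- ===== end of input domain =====

-- B replaces A's start/None state machine with a two-pointer scan over maximal runs; same O(n) cost, different decomposition.

-- ===== PORT A =====
-- A's for-loop over enumerate(lst) with state (zero_ranges, start), then the final flush.
def pvALoop (l : List Int) (i : Int) (start : Option Int) (acc : List (List Int)) : List (List Int) :=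
  match l with
  | [] =>
    match start with
    | none => acc
    | some s => acc ++ [[s, i - 1]]
  | v :: rest =>
    if v = 0 then
      match start with
      | none => pvALoop rest (i + 1) (some i) acc
      | some s => pvALoop rest (i + 1) (some s) acc
    else
      match start with
      | some s => pvALoop rest (i + 1) none (acc ++ [[s, i - 1]])
      | none => pvALoop rest (i + 1) none acc

def count_zero_ranges (lst : List Int) : List (List Int) := pvALoop lst 0 none []

-- ===== PORT B =====
-- B's outer while: consume one maximal run of equal zero-ness per step; the inner
-- while (advance j while (lst[j]==0)==is_zero) is the takeWhile/dropWhile scan on the tail.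
def pvBGo (l : List Int) (i : Int) : List (List Int) :=
  match l with
  | [] => []
  | v :: rest =>
    let k : Bool := v == 0
    let t := rest.takeWhile (fun x => (x == 0) == k)
    let d := rest.dropWhile (fun x => (x == 0) == k)
    let j : Int := i + 1 + t.length
    if k then [i, j - 1] :: pvBGo d j else pvBGo d j
termination_by l.length
decreasing_by
  all_goals
    simp only [List.length_cons]
    exact Nat.lt_succ_of_le (List.length_dropWhile_le _ _)

def count_zero_ranges_alt (lst : List Int) : List (List Int) := pvBGo lst 0

-- ===== PRECONDITION & SPEC =====
def Spec_count_zero_ranges (lst : List Int) (out : List (List Int)) : Prop := out = count_zero_ranges_alt lst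
instance (lst : List Int) (out : List (List Int)) : Decidable (Spec_count_zero_ranges lst out) := by unfold Spec_count_zero_ranges; infer_instance

-- ===== CLAIM (what is proved, stated in full; the proofs are below) =====
def Claim_equal_count_zero_ranges : Prop := ∀ (lst : List Int), Dom_count_zero_ranges lst → Spec_count_zero_ranges lst (count_zero_ranges lst)

-- ===== LEMMAS AND PROOFS =====

-- In state (some s), A consumes the maximal zero run and then flushes [s, end-of-run].
theorem pvALoop_some (rest : List Int) : ∀ (i s : Int) (acc : List (List Int)),
    pvALoop rest i (some s) acc =
      pvALoop (rest.dropWhile (fun x => x == 0)) (i + (rest.takeWhile (fun x => x == 0)).length)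
        none (acc ++ [[s, i + (rest.takeWhile (fun x => x == 0)).length - 1]]) := by
  induction rest with
  | nil => intro i s acc; simp [pvALoop]
  | cons v rest ih =>
    intro i s acc
    by_cases hv : v = 0
    · subst hv
      simp only [pvALoop, List.takeWhile, List.dropWhile, beq_self_eq_true,
        List.length_cons, ih]
      have h1 : i + 1 + ((rest.takeWhile (fun x => x == 0)).length : Int) =
          i + (((rest.takeWhile (fun x => x == 0)).length : Int) + 1) := by ring
      rw [h1]; push_cast; ring_nf
    · have hb : (v == (0:Int)) = false := by simp [hv]
      simp [pvALoop, hv, hb, List.takeWhile, List.dropWhile]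

-- When v ≠ 0, B's run scanner just advances past v.
theorem pvBGo_nonzero_cons (v : Int) (rest : List Int) (i : Int) (hv : v ≠ 0) :
    pvBGo (v :: rest) i = pvBGo rest (i + 1) := by
  have hk : (v == (0:Int)) = false := by simp [hv]
  cases rest with
  | nil => simp [pvBGo, hk]
  | cons w rest' =>
    by_cases hw : w = 0
    · subst hw
      simp [pvBGo, hk, List.takeWhile, List.dropWhile]
    · have hwb : (w == (0:Int)) = false := by simp [hw]
      simp only [pvBGo, hk, List.takeWhile, List.dropWhile, hwb]
      simp only [beq_self_eq_true, Bool.false_eq_true, if_false, List.length_cons]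
      have : i + 1 + (((rest'.takeWhile (fun x => (x == 0) == false)).length : Int) + 1) =
          i + 1 + 1 + ((rest'.takeWhile (fun x => (x == 0) == false)).length : Int) := by ring
      push_cast
      ring_nf

theorem pvMain : ∀ (n : Nat) (lst : List Int), lst.length ≤ n → ∀ (i : Int) (acc : List (List Int)),
    pvALoop lst i none acc = acc ++ pvBGo lst i := by
  intro n
  induction n with
  | zero =>
    intro lst hlen i acc
    have : lst = [] := List.eq_nil_of_length_eq_zero (Nat.le_zero.mp hlen)
    subst this; simp [pvALoop, pvBGo]
  | succ n ih =>
    intro lst hlen i acc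
    cases lst with
    | nil => simp [pvALoop, pvBGo]
    | cons v rest =>
      by_cases hv : v = 0
      · subst hv
        have hstep : pvALoop ((0:Int) :: rest) i none acc = pvALoop rest (i + 1) (some i) acc := by
          simp [pvALoop]
        rw [hstep, pvALoop_some]
        have hd : (rest.dropWhile (fun x => x == (0:Int))).length ≤ n := by
          have := List.length_dropWhile_le (fun x : Int => x == 0) rest
          have hr : rest.length ≤ n := by
            simpa [Nat.succ_le_succ_iff] using hlen
          omega
        rw [ih _ hd]
        have hk : ((0:Int) == 0) = true := by simp
        have hbeq : (fun x : Int => (x == 0) == true) = (fun x : Int => x == 0) := by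
          funext x; simp
        simp only [pvBGo, hk, if_pos, hbeq]
        simp only [List.append_assoc, List.singleton_append]
      · have hstep : pvALoop (v :: rest) i none acc = pvALoop rest (i + 1) none acc := by
          simp [pvALoop, hv]
        rw [hstep, pvBGo_nonzero_cons v rest i hv]
        exact ih rest (by simpa [Nat.succ_le_succ_iff] using hlen) (i + 1) acc

-- ===== VERDICT (by name: the statement is the Claim_ definition above) =====
theorem count_zero_ranges_spec : Claim_equal_count_zero_ranges := by
  intro lst _
  unfold Spec_count_zero_ranges count_zero_ranges count_zero_ranges_alt
  simpa using pvMain lst.length lst le_rfl 0 []
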